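-- pv_equiv track=rewrite | github.com/fitrahidayaat/computing-lab | products/solver_yin_yang.py | translate_to_array
-- ===== SOURCE A (Python) =====
-- from copy import copy, deepcopy
--
-- m = 3
--
-- n = 3
--
-- def translate_to_array(cnf):
--     config = deepcopy(cnf)
--     A = []
--     for r in range(m):
--         row_list = []
--         for c in range(n):
--             if (config.pop(0) > 0): #Positive Value
--                 row_list.append(1)
--             else:                   #Negative Value
--                 row_list.append(0)
--         A.append(row_list)
--     return A
-- ===== SOURCE B (Python) =====
-- m = 3
--
-- n = 3
--
-- def translate_to_array(cnf):
--     flat = [1 if cnf[i] > 0 else 0 for i in range(m * n)]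
--     return [flat[r * n:(r + 1) * n] for r in range(m)]
-- ===== Notes on version B (the rewrite author's own statement) =====
-- stated objective: simpler
-- what changed: Replaces A's deepcopy plus interleaved nested loops with destructive pop(0) by a two-phase flatten-then-reshape: one indexed comprehension builds the nine binary values, a second comprehension slices them into rows.
import Mathlib
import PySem

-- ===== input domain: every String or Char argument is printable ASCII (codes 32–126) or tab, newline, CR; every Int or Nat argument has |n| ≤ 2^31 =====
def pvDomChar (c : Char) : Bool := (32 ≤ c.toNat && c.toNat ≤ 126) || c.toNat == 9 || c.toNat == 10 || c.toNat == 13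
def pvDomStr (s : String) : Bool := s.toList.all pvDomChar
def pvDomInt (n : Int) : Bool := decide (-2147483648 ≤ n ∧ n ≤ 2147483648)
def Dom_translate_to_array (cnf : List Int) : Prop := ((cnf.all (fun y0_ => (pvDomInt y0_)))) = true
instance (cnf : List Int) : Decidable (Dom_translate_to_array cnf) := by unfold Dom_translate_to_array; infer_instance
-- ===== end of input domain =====

-- B replaces A's deepcopy + nested loops with destructive pop(0) by a flatten-then-reshape
-- two-phase decomposition (indexed comprehension, then row slices); same return value under Pre_.
-- ===== PORT A =====
-- inner loop: for c in range(3): config.pop(0) → append 1/0 (none = IndexError)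
def tta_row (config : List Int) (row_list : List Int) (c : Nat) : Option (List Int × List Int) :=
  match c with
  | 0 => some (config, row_list)
  | Nat.succ k =>
    match PySem.List.pop? config 0 with
    | none => none  -- IndexError: pop from empty list
    | some (v, rest) =>
      if v > 0 then tta_row rest (row_list ++ [1]) k
      else tta_row rest (row_list ++ [0]) k

-- outer loop: for r in range(3): build row_list, append to A
def tta_rows (config : List Int) (A : List (List Int)) (r : Nat) : Option (List (List Int)) :=
  match r with
  | 0 => some A
  | Nat.succ k =>
    match tta_row config [] 3 with
    | none => none
    | some (cfg, row_list) => tta_rows cfg (A ++ [row_list]) k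

def translate_to_array (cnf : List Int) : List (List Int) :=
  (tta_rows cnf [] 3).getD []

-- ===== PORT B =====
-- flat = [1 if cnf[i] > 0 else 0 for i in range(m*n)]; return [flat[r*n:(r+1)*n] for r in range(m)]
def translate_to_array_alt (cnf : List Int) : List (List Int) :=
  let flat := (PySem.List.pyRange 0 9 1).map
    (fun i => if PySem.List.pyGetD cnf i 0 > 0 then (1 : Int) else 0)
  (PySem.List.pyRange 0 3 1).map
    (fun r => PySem.List.slice flat (some (r * 3)) (some ((r + 1) * 3)))

-- ===== PRECONDITION & SPEC =====
-- A raises IndexError (pop from empty list) when cnf has fewer than 9 elements; B's cnf[i] raises there too.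
def Pre_translate_to_array (cnf : List Int) : Prop := 9 ≤ cnf.length
instance (cnf : List Int) : Decidable (Pre_translate_to_array cnf) := by
  unfold Pre_translate_to_array; infer_instance

def pvWitness_translate_to_array : List Int := [1, -2, 3, -4, 5, -6, 7, -8, 9]

def Spec_translate_to_array (cnf : List Int) (out : List (List Int)) : Prop := out = translate_to_array_alt cnf
instance (cnf : List Int) (out : List (List Int)) : Decidable (Spec_translate_to_array cnf out) := by unfold Spec_translate_to_array; infer_instance

-- ===== CLAIM (what is proved, stated in full; the proofs are below) =====
def Claim_equal_translate_to_array : Prop := ∀ (cnf : List Int), Dom_translate_to_array cnf → Pre_translate_to_array cnf → Spec_translate_to_array cnf (translate_to_array cnf)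

-- ===== LEMMAS AND PROOFS =====
theorem pop0_cons (x : Int) (xs : List Int) : PySem.List.pop? (x::xs) 0 = some (x, xs) := by
  simp [PySem.List.pop?, PySem.List.pyIdx?]

theorem tta_row_three (x y z : Int) (rest : List Int) :
    tta_row (x::y::z::rest) [] 3 =
      some (rest, [if x > 0 then 1 else 0, if y > 0 then 1 else 0, if z > 0 then 1 else 0]) := by
  simp only [tta_row, pop0_cons]
  split_ifs <;> rfl

-- ===== VERDICT (by name: the statement is the Claim_ definition above) =====
theorem translate_to_array_spec : Claim_equal_translate_to_array := by
  intro cnf _ hpre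
  unfold Pre_translate_to_array at hpre
  match cnf, hpre with
  | a :: b :: c :: d :: e :: f :: g :: h :: i :: t, _ =>
    show translate_to_array _ = translate_to_array_alt _
    simp only [translate_to_array_alt,
      show PySem.List.pyRange 0 9 1 = [0,1,2,3,4,5,6,7,8] from rfl,
      show PySem.List.pyRange 0 3 1 = [0,1,2] from rfl,
      List.map_cons, List.map_nil, PySem.List.pyGetD_ofNat']
    simp only [List.getD, List.getElem?_cons_zero, List.getElem?_cons_succ, Option.getD_some]
    simp only [translate_to_array, tta_rows, tta_row_three]
    norm_num [PySem.List.slice]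
    exact ⟨rfl, rfl, rfl⟩
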